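-- pv_equiv track=rewrite | github.com/EdsonEddy/scsc | notebooks/datasets/medium/686564.py | calcular_costo_minimo
-- ===== SOURCE A (Python) =====
-- def calcular_costo_minimo(numeros):
--     numeros.sort()
--     costo_total = 0
--     while len(numeros) > 1:
--         suma = numeros[0] + numeros[1]
--         costo_total += suma
--         numeros = numeros[2:]
--         numeros.append(suma)
--         numeros.sort()
--     return costo_total
-- ===== SOURCE B (Python) =====
-- def calcular_costo_minimo(numeros):
--     # Two-queue Huffman merging: sort once, then repeatedly take the two
--     # smallest values from the fronts of the sorted leaves and the FIFO of
--     # sums (which stays sorted), instead of re-sorting on every merge.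
--     hojas = sorted(numeros)
--     sumas = []
--     i = 0  # front of hojas
--     j = 0  # front of sumas
--     costo_total = 0
--     while (len(hojas) - i) + (len(sumas) - j) > 1:
--         suma = 0
--         for _ in range(2):
--             if i < len(hojas) and (j >= len(sumas) or hojas[i] <= sumas[j]):
--                 suma += hojas[i]
--                 i += 1
--             else:
--                 suma += sumas[j]
--                 j += 1
--         costo_total += suma
--         sumas.append(suma)
--     return costo_total
-- ===== Notes on version B (the rewrite author's own statement) =====
-- stated objective: faster
-- what changed: Replaces A's re-sort-after-every-merge loop by the two-queue Huffman merge: sort once, then repeatedly pop the two smallest values from the fronts of the sorted leaves list and the FIFO queue of sums (which provably stays sorted).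
import Mathlib
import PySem

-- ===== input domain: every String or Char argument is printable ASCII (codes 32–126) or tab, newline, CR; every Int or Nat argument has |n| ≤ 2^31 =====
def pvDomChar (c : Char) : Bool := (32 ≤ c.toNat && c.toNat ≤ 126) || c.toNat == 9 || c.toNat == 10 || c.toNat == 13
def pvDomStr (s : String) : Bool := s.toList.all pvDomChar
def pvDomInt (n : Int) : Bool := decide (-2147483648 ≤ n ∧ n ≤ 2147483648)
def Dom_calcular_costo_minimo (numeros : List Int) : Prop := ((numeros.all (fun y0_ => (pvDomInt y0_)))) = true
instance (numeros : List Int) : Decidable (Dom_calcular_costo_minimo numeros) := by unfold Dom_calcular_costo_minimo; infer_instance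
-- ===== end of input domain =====

-- B replaces A's re-sort on every merge by a one-off sort plus two sorted queues
-- (leaves and sums), an asymptotically faster Huffman merge; equivalence is about
-- the RETURN value only (the Python A sorts its argument list in place, B does not).

-- ===== PORT A =====
-- while len(numeros) > 1: suma = numeros[0]+numeros[1]; costo += suma;
--   numeros = numeros[2:]; numeros.append(suma); numeros.sort()
def calcular_costo_minimo_go : List Int → Int → Int
  | a :: b :: rest, costo =>
      calcular_costo_minimo_go
        (PySem.List.sorted (rest ++ [a + b]) (fun x => x) false) (costo + (a + b))
  | _, costo => costo
termination_by l _ => l.length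
decreasing_by simp [PySem.List.length_sorted]

def calcular_costo_minimo (numeros : List Int) : Int :=
  calcular_costo_minimo_go (PySem.List.sorted numeros (fun x => x) false) 0

-- ===== PORT B =====
-- Source B's index pointers i/j into hojas/sumas are modelled as the remaining
-- suffixes of the two queues; popping the smaller front = popQ.
def popQ : List Int → List Int → Int × List Int × List Int
  | [], [] => (0, [], [])          -- never reached: guard ensures ≥ 2 live elements
  | [], y :: q => (y, [], q)
  | x :: p, [] => (x, p, [])
  | x :: p, y :: q => if x ≤ y then (x, p, y :: q) else (y, x :: p, q)

theorem popQ_length (p q : List Int) (h : 1 ≤ p.length + q.length) :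
    (popQ p q).2.1.length + (popQ p q).2.2.length + 1 = p.length + q.length := by
  match p, q with
  | [], [] => simp at h
  | [], y :: q => simp [popQ]
  | x :: p, [] => simp [popQ]
  | x :: p, y :: q => by_cases hxy : x ≤ y <;> simp [popQ, hxy] <;> omega

def calcular_costo_minimo_alt_go : List Int → List Int → Int → Int
  | p, q, costo =>
    if h : p.length + q.length ≤ 1 then costo
    else
      let r1 := popQ p q
      let r2 := popQ r1.2.1 r1.2.2
      let suma := r1.1 + r2.1
      calcular_costo_minimo_alt_go r2.2.1 (r2.2.2 ++ [suma]) (costo + suma)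
termination_by p q _ => p.length + q.length
decreasing_by
  simp only [List.length_append, List.length_singleton]
  have h1 : (popQ p q).2.1.length + (popQ p q).2.2.length + 1 = p.length + q.length :=
    popQ_length p q (by omega)
  have h2 := popQ_length (popQ p q).2.1 (popQ p q).2.2 (by omega)
  omega

def calcular_costo_minimo_alt (numeros : List Int) : Int :=
  calcular_costo_minimo_alt_go (PySem.List.sorted numeros (fun x => x) false) [] 0

-- ===== PRECONDITION & SPEC =====
def Spec_calcular_costo_minimo (numeros : List Int) (out : Int) : Prop := out = calcular_costo_minimo_alt numeros
instance (numeros : List Int) (out : Int) : Decidable (Spec_calcular_costo_minimo numeros out) := by unfold Spec_calcular_costo_minimo; infer_instance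

-- ===== CLAIM (what is proved, stated in full; the proofs are below) =====
def Claim_equal_calcular_costo_minimo : Prop := ∀ (numeros : List Int), Dom_calcular_costo_minimo numeros → Spec_calcular_costo_minimo numeros (calcular_costo_minimo numeros)

-- ===== LEMMAS AND PROOFS =====

-- A's loop on a list of length ≤ 1 returns the accumulator unchanged.
theorem go_short (l : List Int) (c : Int) (h : l.length ≤ 1) :
    calcular_costo_minimo_go l c = c := by
  match l with
  | [] => rw [calcular_costo_minimo_go.eq_def]
  | [x] => rw [calcular_costo_minimo_go.eq_def]
  | x :: y :: t => simp at h

-- popQ removes the front of one of the two queues.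
theorem popQ_cases (p q : List Int) (v : Int) (p' q' : List Int)
    (hpq : popQ p q = (v, p', q')) (h : 1 ≤ p.length + q.length) :
    (p' = p ∧ q = v :: q') ∨ (p = v :: p' ∧ q' = q) := by
  match p, q with
  | [], [] => simp at h
  | [], y :: q => simp [popQ] at hpq; simp [hpq]
  | x :: p, [] => simp [popQ] at hpq; simp [hpq]
  | x :: p, y :: q =>
    by_cases hxy : x ≤ y <;> simp [popQ, hxy] at hpq <;> simp [hpq]

theorem popQ_fst_mem (p q : List Int) (v : Int) (p' q' : List Int)
    (hpq : popQ p q = (v, p', q')) (h : 1 ≤ p.length + q.length) :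
    v ∈ p ++ q := by
  rcases popQ_cases p q v p' q' hpq h with ⟨_, hq⟩ | ⟨hp, _⟩
  · rw [hq]; simp
  · rw [hp]; simp

theorem popQ_perm (p q : List Int) (v : Int) (p' q' : List Int)
    (hpq : popQ p q = (v, p', q')) (h : 1 ≤ p.length + q.length) :
    (v :: (p' ++ q')).Perm (p ++ q) := by
  rcases popQ_cases p q v p' q' hpq h with ⟨hp, hq⟩ | ⟨hp, hq⟩
  · rw [hp, hq]; exact List.perm_middle.symm
  · rw [hp, hq]; simp

theorem popQ_sub_left (p q : List Int) (v : Int) (p' q' : List Int)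
    (hpq : popQ p q = (v, p', q')) (h : 1 ≤ p.length + q.length) :
    List.Sublist p' p := by
  rcases popQ_cases p q v p' q' hpq h with ⟨hp, _⟩ | ⟨hp, _⟩
  · rw [hp]
  · rw [hp]; exact List.sublist_cons_self _ _

theorem popQ_sub_right (p q : List Int) (v : Int) (p' q' : List Int)
    (hpq : popQ p q = (v, p', q')) (h : 1 ≤ p.length + q.length) :
    List.Sublist q' q := by
  rcases popQ_cases p q v p' q' hpq h with ⟨_, hq⟩ | ⟨_, hq⟩
  · rw [hq]; exact List.sublist_cons_self _ _
  · rw [hq]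

-- On two sorted queues popQ pops a minimum of the union.
theorem popQ_min (p q : List Int) (hp : p.Pairwise (· ≤ ·)) (hq : q.Pairwise (· ≤ ·))
    (h : 1 ≤ p.length + q.length) : ∀ w ∈ p ++ q, (popQ p q).1 ≤ w := by
  match p, q with
  | [], [] => simp at h
  | [], y :: q =>
    intro w hw; simp [popQ] at hw ⊢
    rcases hw with rfl | hw
    · exact le_refl _
    · exact List.rel_of_pairwise_cons hq hw
  | x :: p, [] =>
    intro w hw; simp [popQ] at hw ⊢
    rcases hw with rfl | hw
    · exact le_refl _
    · exact List.rel_of_pairwise_cons hp hw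
  | x :: p, y :: q =>
    intro w hw
    simp only [List.mem_append, List.mem_cons] at hw
    by_cases hxy : x ≤ y <;> simp [popQ, hxy]
    · rcases hw with (rfl | hw) | (rfl | hw)
      · exact le_refl _
      · exact List.rel_of_pairwise_cons hp hw
      · exact hxy
      · exact le_trans hxy (List.rel_of_pairwise_cons hq hw)
    · rcases hw with (rfl | hw) | (rfl | hw)
      · omega
      · exact le_trans (by omega) (List.rel_of_pairwise_cons hp hw)
      · exact le_refl _
      · exact List.rel_of_pairwise_cons hq hw

-- The invariant of the two-queue loop: leaves sorted, sums queue sorted with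
-- each later entry at most double an earlier one, and each sum at most double
-- any remaining leaf.
def InvQ (p q : List Int) : Prop :=
  p.Pairwise (· ≤ ·) ∧ q.Pairwise (fun u v => u ≤ v ∧ v ≤ 2 * u) ∧
  ∀ z ∈ q, ∀ x ∈ p, z ≤ 2 * x

-- Main loop equivalence: A's re-sorting loop on the merged multiset equals
-- B's two-queue loop.
theorem main_loop (n : Nat) : ∀ p q c, p.length + q.length = n → InvQ p q →
    calcular_costo_minimo_go (PySem.List.sorted (p ++ q) (fun x => x) false) c =
    calcular_costo_minimo_alt_go p q c := by
  induction n using Nat.strong_induction_on with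
  | _ n ih =>
    intro p q c hn hinv
    obtain ⟨hp, hq, hx⟩ := hinv
    rw [calcular_costo_minimo_alt_go]
    by_cases h : p.length + q.length ≤ 1
    · rw [dif_pos h]
      exact go_short _ _ (by rw [PySem.List.length_sorted, List.length_append]; omega)
    · rw [dif_neg h]
      rcases hpq1 : popQ p q with ⟨v1, p1, q1⟩
      rcases hpq2 : popQ p1 q1 with ⟨v2, p2, q2⟩
      simp only [hpq2]
      -- lengths
      have hl1 := popQ_length p q (by omega)
      rw [hpq1] at hl1
      simp only at hl1
      have hl2 := popQ_length p1 q1 (by omega)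
      rw [hpq2] at hl2
      simp only at hl2
      -- the sorted merged list has ≥ 2 elements
      have hslen : (PySem.List.sorted (p ++ q) (fun x => x) false).length =
          p.length + q.length := by
        rw [PySem.List.length_sorted, List.length_append]
      obtain ⟨a, b, rest, hs⟩ : ∃ a b rest,
          PySem.List.sorted (p ++ q) (fun x => x) false = a :: b :: rest := by
        match hsm : PySem.List.sorted (p ++ q) (fun x => x) false with
        | [] => rw [hsm] at hslen; simp at hslen; omega
        | [x] => rw [hsm] at hslen; simp at hslen; omega
        | a :: b :: rest => exact ⟨a, b, rest, rfl⟩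
      have hsp : (a :: b :: rest).Perm (p ++ q) := hs ▸ PySem.List.sorted_perm _ _ _
      have hss : (a :: b :: rest).Pairwise (fun u v : Int => u ≤ v) := by
        have := PySem.List.sorted_pairwise (xs := p ++ q) (key := fun x : Int => x)
        rw [hs] at this; exact this
      -- queue facts, first pop
      have hsubp1 : List.Sublist p1 p := popQ_sub_left p q v1 p1 q1 hpq1 (by omega)
      have hsubq1 : List.Sublist q1 q := popQ_sub_right p q v1 p1 q1 hpq1 (by omega)
      have hp1 : p1.Pairwise (· ≤ ·) := hp.sublist hsubp1
      have hq1 : q1.Pairwise (fun u v => u ≤ v ∧ v ≤ 2 * u) := hq.sublist hsubq1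
      have hq1le : q1.Pairwise (· ≤ ·) := hq1.imp (fun h => h.1)
      have hqle : q.Pairwise (· ≤ ·) := hq.imp (fun h => h.1)
      have hmin1 : ∀ w ∈ p ++ q, v1 ≤ w := by
        have := popQ_min p q hp hqle (by omega)
        rw [hpq1] at this; exact this
      have hv1mem : v1 ∈ p ++ q := popQ_fst_mem p q v1 p1 q1 hpq1 (by omega)
      have hamin : ∀ w ∈ p ++ q, a ≤ w := by
        intro w hw
        have hw' : w ∈ a :: b :: rest := hsp.symm.subset hw
        rcases List.mem_cons.1 hw' with rfl | hw'
        · exact le_refl _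
        · exact List.rel_of_pairwise_cons hss hw'
      have ha : a = v1 :=
        le_antisymm (hamin v1 hv1mem)
          (hmin1 a (hsp.subset List.mem_cons_self))
      have hperm1 : (v1 :: (p1 ++ q1)).Perm (p ++ q) :=
        popQ_perm p q v1 p1 q1 hpq1 (by omega)
      have hpermrest : (b :: rest).Perm (p1 ++ q1) := by
        have : (a :: b :: rest).Perm (v1 :: (p1 ++ q1)) := hsp.trans hperm1.symm
        rw [ha] at this
        exact this.cons_inv
      -- second pop
      have hsubp2 : List.Sublist p2 p1 := popQ_sub_left p1 q1 v2 p2 q2 hpq2 (by omega)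
      have hsubq2 : List.Sublist q2 q1 := popQ_sub_right p1 q1 v2 p2 q2 hpq2 (by omega)
      have hp2 : p2.Pairwise (· ≤ ·) := hp1.sublist hsubp2
      have hq2 : q2.Pairwise (fun u v => u ≤ v ∧ v ≤ 2 * u) := hq1.sublist hsubq2
      have hmin2 : ∀ w ∈ p1 ++ q1, v2 ≤ w := by
        have := popQ_min p1 q1 hp1 hq1le (by omega)
        rw [hpq2] at this; exact this
      have hv2mem : v2 ∈ p1 ++ q1 := popQ_fst_mem p1 q1 v2 p2 q2 hpq2 (by omega)
      have hbmin : ∀ w ∈ p1 ++ q1, b ≤ w := by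
        intro w hw
        have hw' : w ∈ b :: rest := hpermrest.symm.subset hw
        rcases List.mem_cons.1 hw' with rfl | hw'
        · exact le_refl _
        · exact List.rel_of_pairwise_cons (List.Pairwise.of_cons hss) hw'
      have hb : b = v2 :=
        le_antisymm (hbmin v2 hv2mem)
          (hmin2 b (hpermrest.subset List.mem_cons_self))
      have hab : a ≤ b := (List.pairwise_cons.1 hss).1 b List.mem_cons_self
      have hpermrest2 : rest.Perm (p2 ++ q2) := by
        have h2 : (v2 :: (p2 ++ q2)).Perm (p1 ++ q1) :=
          popQ_perm p1 q1 v2 p2 q2 hpq2 (by omega)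
        have : (b :: rest).Perm (v2 :: (p2 ++ q2)) := hpermrest.trans h2.symm
        rw [hb] at this
        exact this.cons_inv
      -- unfold one step of A's loop
      rw [hs]
      rw [calcular_costo_minimo_go]
      -- A's re-sorted state is B's merged state, sorted
      have hsorteq : PySem.List.sorted (rest ++ [a + b]) (fun x => x) false =
          PySem.List.sorted (p2 ++ (q2 ++ [a + b])) (fun x => x) false := by
        apply PySem.List.sorted_id_eq_of_perm_of_pairwise
        · exact (PySem.List.sorted_perm _ _ _).trans
            (by rw [← List.append_assoc]
                exact (hpermrest2.symm.append (List.Perm.refl [a + b])))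
        · have := PySem.List.sorted_pairwise
            (xs := p2 ++ (q2 ++ [a + b])) (key := fun x : Int => x)
          exact this
      rw [hsorteq]
      -- b ≤ every survivor
      have hble_p2 : ∀ x ∈ p2, b ≤ x := fun x hx' =>
        hbmin x (List.mem_append.2 (Or.inl (hsubp2.subset hx')))
      have hble_q2 : ∀ z ∈ q2, b ≤ z := fun z hz =>
        hbmin z (List.mem_append.2 (Or.inr (hsubq2.subset hz)))
      -- every old sum is ≤ 2a
      have hz2a : ∀ z ∈ q2, z ≤ 2 * a := by
        intro z hz
        rcases popQ_cases p q v1 p1 q1 hpq1 (by omega) with ⟨_, hqe⟩ | ⟨hpe, _⟩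
        · -- v1 popped from the sums queue: pairwise relation in q
          have hzq1 : z ∈ q1 := hsubq2.subset hz
          have := List.rel_of_pairwise_cons (hqe ▸ hq) hzq1
          rw [ha]; exact this.2
        · -- v1 popped from the leaves: cross invariant
          have hzq : z ∈ q := hsubq1.subset (hsubq2.subset hz)
          have hv1p : v1 ∈ p := by rw [hpe]; exact List.mem_cons_self
          rw [ha]; exact hx z hzq v1 hv1p
      -- invariant for the next state
      have hinv' : InvQ p2 (q2 ++ [a + b]) := by
        refine ⟨hp2, ?_, ?_⟩
        · rw [List.pairwise_append]
          refine ⟨hq2, List.pairwise_singleton _ _, ?_⟩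
          intro z hz w hw
          rcases List.mem_singleton.1 hw with rfl
          have h1 := hz2a z hz
          have h2 := hble_q2 z hz
          constructor <;> omega
        · intro z hz x hx'
          rcases List.mem_append.1 hz with hz | hz
          · exact hx z (hsubq1.subset (hsubq2.subset hz)) x
              (hsubp1.subset (hsubp2.subset hx'))
          · rcases List.mem_singleton.1 hz with rfl
            have := hble_p2 x hx'
            omega
      -- close by induction hypothesis
      have hcall := ih (p2.length + (q2 ++ [a + b]).length)
        (by simp only [List.length_append, List.length_singleton]; omega)
        p2 (q2 ++ [a + b]) (c + (a + b)) rfl hinv'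
      rw [hcall, ha, hb]

-- ===== VERDICT (by name: the statement is the Claim_ definition above) =====
theorem calcular_costo_minimo_spec : Claim_equal_calcular_costo_minimo := by
  intro numeros _
  unfold Spec_calcular_costo_minimo calcular_costo_minimo calcular_costo_minimo_alt
  have := main_loop (numeros.length) (PySem.List.sorted numeros (fun x => x) false) [] 0
    (by rw [PySem.List.length_sorted]; simp)
    ⟨by
      have := PySem.List.sorted_pairwise (xs := numeros) (key := fun x => x)
      exact this, by simp, by simp⟩
  simpa using this
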